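-- pv_equiv track=rewrite | github.com/akam1o/arca-storage | arca_storage/arca_storage/openstack/manila/client.py | _extract_resource_id
-- ===== SOURCE A (Python) =====
-- from typing import Any, Dict, List, Optional
--
-- def _extract_resource_id(
--     path: str, method: str, json_data: Optional[Dict[str, Any]] = None
-- ) -> str:
--     """Extract resource ID from path intelligently.
--
--     Args:
--         path: API path (e.g., /v1/volumes/share-123/clone)
--         method: HTTP method
--         json_data: Request body (for POST operations)
--
--     Returns:
--         Resource ID string
--
--     Examples:
--         /v1/volumes/share-123 → share-123
--         /v1/volumes/share-123/clone → share-123 (source volume in path)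
--         /v1/volumes/share-123/qos → share-123
--         /v1/snapshots/snap-456 → snap-456
--         /v1/svms/svm-name/capacity → svm-name
--         POST /v1/volumes with {"name": "share-123"} → share-123 (new resource)
--
--     Note:
--         For POST operations, prefers resource ID from path if present (e.g., for
--         clone operations). Only uses json_data["name"] for collection-create
--         endpoints like POST /v1/volumes (no resource ID in path).
--     """
--     # Split path and filter out empty segments
--     parts = [p for p in path.split("/") if p]
--
--     # Priority 1: Extract from path if resource ID exists
--     # Pattern: /v1/volumes/{volume_name}[/action]
--     if "volumes" in parts:
--         idx = parts.index("volumes")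
--         if idx + 1 < len(parts):
--             resource_part = parts[idx + 1]
--             # If it's an action word, not a resource ID, fall through
--             if resource_part not in ["volumes", "v1"]:
--                 return resource_part
--
--     # Pattern: /v1/snapshots/{snapshot_name}[/action]
--     elif "snapshots" in parts:
--         idx = parts.index("snapshots")
--         if idx + 1 < len(parts):
--             resource_part = parts[idx + 1]
--             if resource_part not in ["snapshots", "v1"]:
--                 return resource_part
--
--     # Pattern: /v1/svms/{svm_name}[/action]
--     elif "svms" in parts:
--         idx = parts.index("svms")
--         if idx + 1 < len(parts):
--             resource_part = parts[idx + 1]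
--             if resource_part not in ["svms", "v1"]:
--                 return resource_part
--
--     # Pattern: /v1/exports (no specific ID in path)
--     elif "exports" in parts:
--         # For collection-create POST operations, use name from body
--         if method == "POST" and json_data and "name" in json_data:
--             return json_data["name"]
--         return "exports"
--
--     # Priority 2: For collection-create POST operations (no resource ID in path),
--     # use name from request body
--     if method == "POST" and json_data and "name" in json_data:
--         return json_data["name"]
--
--     # Fallback: use last non-empty segment
--     return parts[-1] if parts else "unknown"
-- ===== SOURCE B (Python) =====
-- PRIORITY = {"volumes": 0, "snapshots": 1, "svms": 2, "exports": 3}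
--
--
-- def _best(parts):
--     """Recursively pick the highest-priority marker segment, pairing each
--     segment with its successor; earlier occurrence wins ties."""
--     if not parts:
--         return None
--     p, rest = parts[0], parts[1:]
--     cand = (PRIORITY[p], p, rest[0] if rest else None) if p in PRIORITY else None
--     sub = _best(rest)
--     if cand is None:
--         return sub
--     if sub is None or cand[0] <= sub[0]:
--         return cand
--     return sub
--
--
-- def _extract_resource_id(path, method, json_data=None):
--     parts = [p for p in path.split("/") if p]
--     name = (
--         json_data["name"]
--         if (method == "POST" and json_data and "name" in json_data)
--         else None
--     )
--     best = _best(parts)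
--     if best is not None:
--         _, kw, nxt = best
--         if kw == "exports":
--             return name if name is not None else "exports"
--         if nxt is not None and nxt not in (kw, "v1"):
--             return nxt
--     return name if name is not None else (parts[-1] if parts else "unknown")
-- ===== Notes on version B (the rewrite author's own statement) =====
-- stated objective: alternative
-- what changed: Instead of A's elif chain of four membership tests plus list.index scans, B makes one recursive pass over the segments paired with their successors, selecting the highest-priority marker (earliest wins ties) via a priority map, then applies a single shared extraction to that selected (marker, successor) pair.
import Mathlib
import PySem

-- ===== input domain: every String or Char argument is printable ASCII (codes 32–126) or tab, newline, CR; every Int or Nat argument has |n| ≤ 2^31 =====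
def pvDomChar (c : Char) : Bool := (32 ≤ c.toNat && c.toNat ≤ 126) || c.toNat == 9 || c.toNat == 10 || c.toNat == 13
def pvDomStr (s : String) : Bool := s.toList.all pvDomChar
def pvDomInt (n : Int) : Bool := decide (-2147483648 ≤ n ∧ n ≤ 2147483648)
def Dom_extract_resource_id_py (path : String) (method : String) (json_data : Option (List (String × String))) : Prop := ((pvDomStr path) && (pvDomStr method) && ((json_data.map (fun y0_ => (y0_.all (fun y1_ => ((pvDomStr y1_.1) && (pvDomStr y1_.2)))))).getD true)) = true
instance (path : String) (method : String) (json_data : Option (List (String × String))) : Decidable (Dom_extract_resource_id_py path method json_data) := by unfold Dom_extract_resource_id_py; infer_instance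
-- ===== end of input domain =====

-- B replaces A's elif chain of membership tests and index scans by one
-- recursive pass selecting the highest-priority marker segment together with
-- its successor, then one shared extraction step (objective: alternative).

-- ===== PORT A =====
-- A's unrolled elif chain, transliterated branch by branch. `post` is
-- `json_data["name"]` when `method == "POST" and json_data and "name" in
-- json_data` (none otherwise); the Priority-2 POST check followed by
-- `parts[-1] if parts else "unknown"` is the let-bound `fallback`.
def extract_resource_id_py (path : String) (method : String) (json_data : Option (List (String × String))) : String :=
  let parts := ((PySem.Str.split? path "/").getD []).filter (fun p => decide (p ≠ ""))
  let post : Option String :=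
    if method = "POST" then ((json_data.getD []).find? (fun kv => kv.1 == "name")).map (fun kv => kv.2)
    else none
  let fallback : String := post.getD (parts.getLast?.getD "unknown")
  if "volumes" ∈ parts then
    let idx := (PySem.List.index? parts "volumes").getD 0
    if h : idx + 1 < parts.length then
      let rp := parts[idx + 1]
      if rp ≠ "volumes" ∧ rp ≠ "v1" then rp else fallback
    else fallback
  else if "snapshots" ∈ parts then
    let idx := (PySem.List.index? parts "snapshots").getD 0
    if h : idx + 1 < parts.length then
      let rp := parts[idx + 1]
      if rp ≠ "snapshots" ∧ rp ≠ "v1" then rp else fallback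
    else fallback
  else if "svms" ∈ parts then
    let idx := (PySem.List.index? parts "svms").getD 0
    if h : idx + 1 < parts.length then
      let rp := parts[idx + 1]
      if rp ≠ "svms" ∧ rp ≠ "v1" then rp else fallback
    else fallback
  else if "exports" ∈ parts then
    post.getD "exports"
  else fallback

-- ===== PORT B =====
-- PRIORITY.get(p) (as PRIORITY[p] guarded by `p in PRIORITY` in Source B)
def pvPriority (p : String) : Option Nat :=
  if p = "volumes" then some 0
  else if p = "snapshots" then some 1
  else if p = "svms" then some 2
  else if p = "exports" then some 3
  else none

-- _best(parts): recursive selection of the highest-priority marker segment,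
-- each paired with its successor; earlier occurrence wins ties
def pvBest : List String → Option (Nat × String × Option String)
  | [] => none
  | p :: rest =>
    let cand := (pvPriority p).map (fun pr => (pr, p, rest.head?))
    let sub := pvBest rest
    match cand, sub with
    | none, s => s
    | some c, none => some c
    | some c, some s => if c.1 ≤ s.1 then some c else some s

def extract_resource_id_py_alt (path : String) (method : String) (json_data : Option (List (String × String))) : String :=
  let parts := ((PySem.Str.split? path "/").getD []).filter (fun p => decide (p ≠ ""))
  let name : Option String :=
    if method = "POST" then ((json_data.getD []).find? (fun kv => kv.1 == "name")).map (fun kv => kv.2)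
    else none
  let tail : String := name.getD (parts.getLast?.getD "unknown")
  match pvBest parts with
  | some (_, kw, nxt) =>
    if kw = "exports" then name.getD "exports"
    else match nxt with
      | some n => if n ≠ kw ∧ n ≠ "v1" then n else tail
      | none => tail
  | none => tail

-- ===== PRECONDITION & SPEC =====
def Spec_extract_resource_id_py (path : String) (method : String) (json_data : Option (List (String × String))) (out : String) : Prop := out = extract_resource_id_py_alt path method json_data
instance (path : String) (method : String) (json_data : Option (List (String × String))) (out : String) : Decidable (Spec_extract_resource_id_py path method json_data out) := by unfold Spec_extract_resource_id_py; infer_instance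

-- ===== CLAIM =====
def Claim_equal_extract_resource_id_py : Prop := ∀ (path : String) (method : String) (json_data : Option (List (String × String))), Dom_extract_resource_id_py path method json_data → Spec_extract_resource_id_py path method json_data (extract_resource_id_py path method json_data)

-- ===== LEMMAS AND PROOFS =====

-- the element following the first occurrence of kw (none if kw absent or last)
def pvNextAfter (kw : String) : List String → Option String
  | [] => none
  | p :: rest => if p = kw then rest.head? else pvNextAfter kw rest

theorem pvNextAfter_eq_get (kw : String) (parts : List String) (hm : kw ∈ parts) :
    parts[(PySem.List.index? parts kw).getD 0 + 1]? = pvNextAfter kw parts := by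
  induction parts with
  | nil => cases hm
  | cons p rest ih =>
    by_cases hpk : p = kw
    · subst hpk
      rw [PySem.List.index?_cons_self]
      simp [pvNextAfter, List.getElem?_cons_succ, List.head?_eq_getElem?]
    · have hm' : kw ∈ rest := by
        rcases List.mem_cons.mp hm with h | h
        · exact absurd h.symm hpk
        · exact h
      rw [PySem.List.index?_cons_of_ne rest hpk]
      have hs : (PySem.List.index? rest kw).isSome := (PySem.List.index?_isSome_iff rest kw).mpr hm'
      rcases Option.isSome_iff_exists.mp hs with ⟨k, hk⟩
      rw [hk]
      have h2 := ih hm'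
      rw [hk] at h2
      simpa [pvNextAfter, hpk, List.getElem?_cons_succ] using h2

-- pvBest characterised by the elif chain's membership priority
theorem pvBest_spec (parts : List String) :
    pvBest parts =
      if "volumes" ∈ parts then some (0, "volumes", pvNextAfter "volumes" parts)
      else if "snapshots" ∈ parts then some (1, "snapshots", pvNextAfter "snapshots" parts)
      else if "svms" ∈ parts then some (2, "svms", pvNextAfter "svms" parts)
      else if "exports" ∈ parts then some (3, "exports", pvNextAfter "exports" parts)
      else none := by
  induction parts with
  | nil => simp [pvBest]
  | cons p rest ih =>
    simp only [pvBest, ih, pvNextAfter, List.mem_cons]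
    by_cases h1 : p = "volumes" <;> by_cases h2 : p = "snapshots" <;>
      by_cases h3 : p = "svms" <;> by_cases h4 : p = "exports" <;>
      simp_all [pvPriority] <;>
      by_cases m1 : "volumes" ∈ rest <;> by_cases m2 : "snapshots" ∈ rest <;>
      by_cases m3 : "svms" ∈ rest <;> by_cases m4 : "exports" ∈ rest <;>
      simp_all [eq_comm]

-- A's keyword step (index? + bounded getElem) equals B's step on the successor
theorem pvStep_eq (kw : String) (parts : List String) (hm : kw ∈ parts) (tail : String) :
    (let idx := (PySem.List.index? parts kw).getD 0
     if h : idx + 1 < parts.length then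
       let rp := parts[idx + 1]
       if rp ≠ kw ∧ rp ≠ "v1" then rp else tail
     else tail) =
    (match pvNextAfter kw parts with
     | some n => if n ≠ kw ∧ n ≠ "v1" then n else tail
     | none => tail) := by
  have hget := pvNextAfter_eq_get kw parts hm
  by_cases h : (PySem.List.index? parts kw).getD 0 + 1 < parts.length
  · rw [List.getElem?_eq_getElem h] at hget
    simp only [dif_pos h, ← hget]
  · rw [List.getElem?_eq_none (by omega)] at hget
    simp only [dif_neg h, ← hget]

-- A's whole elif chain equals B's selection-then-extraction, over the same
-- parts and the same POST/body name `post`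
theorem pvChain_eq (parts : List String) (post : Option String) :
    (if "volumes" ∈ parts then
       let idx := (PySem.List.index? parts "volumes").getD 0
       if h : idx + 1 < parts.length then
         let rp := parts[idx + 1]
         if rp ≠ "volumes" ∧ rp ≠ "v1" then rp else post.getD (parts.getLast?.getD "unknown")
       else post.getD (parts.getLast?.getD "unknown")
     else if "snapshots" ∈ parts then
       let idx := (PySem.List.index? parts "snapshots").getD 0
       if h : idx + 1 < parts.length then
         let rp := parts[idx + 1]
         if rp ≠ "snapshots" ∧ rp ≠ "v1" then rp else post.getD (parts.getLast?.getD "unknown")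
       else post.getD (parts.getLast?.getD "unknown")
     else if "svms" ∈ parts then
       let idx := (PySem.List.index? parts "svms").getD 0
       if h : idx + 1 < parts.length then
         let rp := parts[idx + 1]
         if rp ≠ "svms" ∧ rp ≠ "v1" then rp else post.getD (parts.getLast?.getD "unknown")
       else post.getD (parts.getLast?.getD "unknown")
     else if "exports" ∈ parts then
       post.getD "exports"
     else post.getD (parts.getLast?.getD "unknown")) =
    (match pvBest parts with
     | some (_, kw, nxt) =>
       if kw = "exports" then post.getD "exports"
       else match nxt with
         | some n => if n ≠ kw ∧ n ≠ "v1" then n else post.getD (parts.getLast?.getD "unknown")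
         | none => post.getD (parts.getLast?.getD "unknown")
     | none => post.getD (parts.getLast?.getD "unknown")) := by
  rw [pvBest_spec]
  by_cases h1 : "volumes" ∈ parts
  · simp only [if_pos h1]
    exact pvStep_eq "volumes" parts h1 _
  · simp only [if_neg h1]
    by_cases h2 : "snapshots" ∈ parts
    · simp only [if_pos h2]
      exact pvStep_eq "snapshots" parts h2 _
    · simp only [if_neg h2]
      by_cases h3 : "svms" ∈ parts
      · simp only [if_pos h3]
        exact pvStep_eq "svms" parts h3 _
      · simp only [if_neg h3]
        by_cases h4 : "exports" ∈ parts
        · simp only [if_pos h4]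
          rfl
        · simp only [if_neg h4]

-- ===== VERDICT =====
theorem extract_resource_id_py_spec : Claim_equal_extract_resource_id_py := by
  intro path method json_data _
  unfold Spec_extract_resource_id_py extract_resource_id_py extract_resource_id_py_alt
  exact pvChain_eq (((PySem.Str.split? path "/").getD []).filter (fun p => decide (p ≠ "")))
    (if method = "POST" then ((json_data.getD []).find? (fun kv => kv.1 == "name")).map (fun kv => kv.2) else none)
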